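-- pv_equiv track=rewrite | github.com/iross/gpureports | device_name_mappings.py | get_memory_category
-- ===== SOURCE A (Python) =====
-- DEVICE_MEMORY_MAPPINGS = {
--     "NVIDIA A100-SXM4-40GB": 40,
--     "NVIDIA A100-SXM4-80GB": 80,
--     "NVIDIA A30": 24,  # A30 has 24GB
--     "NVIDIA A40": 48,  # A40 has 48GB
--     "NVIDIA GeForce GTX 1080 Ti": 11,  # GTX 1080 Ti has 11GB
--     "NVIDIA GeForce RTX 2080 Ti": 11,  # RTX 2080 Ti has 11GB
--     "NVIDIA H100 80GB HBM3": 80,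
--     "NVIDIA H200": 141,  # H200 has 141GB HBM3e
--     "NVIDIA L40": 48,   # L40 has 48GB
--     "NVIDIA L40S": 48,  # L40S has 48GB
--     "Quadro RTX 6000": 24,  # Quadro RTX 6000 has 24GB
--     "Tesla P100-PCIE-16GB": 16
-- }
--
-- MEMORY_CATEGORIES = {
--     "10-12GB": (10, 12),   # GTX 1080 Ti, RTX 2080 Ti
--     "16GB": (15, 17),      # Tesla P100
--     "24GB": (20, 25),      # A30, Quadro RTX 6000
--     "40GB": (35, 42),      # A100 40GB
--     "48GB": (45, 50),      # A40, L40, L40S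
--     "80GB": (75, 85),      # A100 80GB, H100
--     "140GB+": (135, 200)   # H200
-- }
--
-- def get_device_memory_gb(device_name: str) -> int:
--     """
--     Get the memory capacity in GB for a device.
--
--     Args:
--         device_name: Technical device name from GPUs_DeviceName field
--
--     Returns:
--         Memory capacity in GB, or 0 if unknown
--     """
--     return DEVICE_MEMORY_MAPPINGS.get(device_name, 0)
--
-- def get_memory_category(device_name: str) -> str:
--     """
--     Get the memory category for a device using hard-coded mapping.
--
--     Args:
--         device_name: Technical device name from GPUs_DeviceName field
--
--     Returns:
--         Memory category string (e.g., "24GB", "80GB")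
--     """
--     memory_gb = get_device_memory_gb(device_name)
--
--     if memory_gb == 0:
--         return "Unknown"
--
--     for category, (min_mem, max_mem) in MEMORY_CATEGORIES.items():
--         if min_mem <= memory_gb <= max_mem:
--             return category
--
--     # Fallback for devices not in our categories
--     return f"{memory_gb}GB"
-- ===== SOURCE B (Python) =====
-- DEVICE_MEMORY_MAPPINGS = {
--     "NVIDIA A100-SXM4-40GB": 40,
--     "NVIDIA A100-SXM4-80GB": 80,
--     "NVIDIA A30": 24,
--     "NVIDIA A40": 48,
--     "NVIDIA GeForce GTX 1080 Ti": 11,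
--     "NVIDIA GeForce RTX 2080 Ti": 11,
--     "NVIDIA H100 80GB HBM3": 80,
--     "NVIDIA H200": 141,
--     "NVIDIA L40": 48,
--     "NVIDIA L40S": 48,
--     "Quadro RTX 6000": 24,
--     "Tesla P100-PCIE-16GB": 16
-- }
--
-- MEMORY_CATEGORIES = {
--     "10-12GB": (10, 12),
--     "16GB": (15, 17),
--     "24GB": (20, 25),
--     "40GB": (35, 42),
--     "48GB": (45, 50),
--     "80GB": (75, 85),
--     "140GB+": (135, 200)
-- }
--
-- # Precompute device -> category once, resolving each memory value through the
-- # category ranges (f-string fallback preserved), so each call is one dict lookup.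
-- DEVICE_CATEGORY = {
--     name: next((cat for cat, (lo, hi) in MEMORY_CATEGORIES.items() if lo <= mem <= hi),
--                f"{mem}GB")
--     for name, mem in DEVICE_MEMORY_MAPPINGS.items()
-- }
--
-- def get_memory_category(device_name: str) -> str:
--     return DEVICE_CATEGORY.get(device_name, "Unknown")
-- ===== Notes on version B (the rewrite author's own statement) =====
-- stated objective: faster
-- what changed: Precompute a device->category dict once at module load (resolving each memory value through the category ranges, keeping the f-string fallback), so each call is a single dict lookup instead of a lookup plus a linear scan over the category ranges.
import Mathlib
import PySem

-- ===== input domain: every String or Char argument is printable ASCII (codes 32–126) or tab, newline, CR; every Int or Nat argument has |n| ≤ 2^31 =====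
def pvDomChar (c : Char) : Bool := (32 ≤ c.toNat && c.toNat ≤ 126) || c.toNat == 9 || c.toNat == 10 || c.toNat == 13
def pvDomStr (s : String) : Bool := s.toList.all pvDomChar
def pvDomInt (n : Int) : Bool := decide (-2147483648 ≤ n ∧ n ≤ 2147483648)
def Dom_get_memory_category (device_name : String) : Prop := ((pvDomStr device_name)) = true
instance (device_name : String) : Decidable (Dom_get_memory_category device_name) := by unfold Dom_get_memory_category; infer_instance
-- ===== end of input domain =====

-- B precomputes a device -> category dict once so each call is one lookup (objective: faster, constant-factor).

-- ===== PORT A =====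
def DEVICE_MEMORY_MAPPINGS : PySem.Dict String Int :=
  PySem.Dict.ofList [
    ("NVIDIA A100-SXM4-40GB", 40),
    ("NVIDIA A100-SXM4-80GB", 80),
    ("NVIDIA A30", 24),
    ("NVIDIA A40", 48),
    ("NVIDIA GeForce GTX 1080 Ti", 11),
    ("NVIDIA GeForce RTX 2080 Ti", 11),
    ("NVIDIA H100 80GB HBM3", 80),
    ("NVIDIA H200", 141),
    ("NVIDIA L40", 48),
    ("NVIDIA L40S", 48),
    ("Quadro RTX 6000", 24),
    ("Tesla P100-PCIE-16GB", 16)]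

def MEMORY_CATEGORIES : PySem.Dict String (Int × Int) :=
  PySem.Dict.ofList [
    ("10-12GB", (10, 12)),
    ("16GB", (15, 17)),
    ("24GB", (20, 25)),
    ("40GB", (35, 42)),
    ("48GB", (45, 50)),
    ("80GB", (75, 85)),
    ("140GB+", (135, 200))]

def get_device_memory_gb (device_name : String) : Int :=
  PySem.Dict.getD DEVICE_MEMORY_MAPPINGS device_name 0

-- the 'for category, (min_mem, max_mem) in MEMORY_CATEGORIES.items(): if …: return' loop
def categoryLoop (memory_gb : Int) : List (String × (Int × Int)) → String
  | [] => PySem.Int.toStr memory_gb ++ "GB"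
  | (category, (min_mem, max_mem)) :: rest =>
      if min_mem ≤ memory_gb ∧ memory_gb ≤ max_mem then category
      else categoryLoop memory_gb rest

def get_memory_category (device_name : String) : String :=
  let memory_gb := get_device_memory_gb device_name
  if memory_gb = 0 then "Unknown"
  else categoryLoop memory_gb (PySem.Dict.items MEMORY_CATEGORIES)

-- ===== PORT B =====
-- next((cat for cat, (lo, hi) in MEMORY_CATEGORIES.items() if lo <= mem <= hi), f"{mem}GB")
def resolveCategory (mem : Int) : String :=
  match (PySem.Dict.items MEMORY_CATEGORIES).find? (fun p => decide (p.2.1 ≤ mem ∧ mem ≤ p.2.2)) with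
  | some p => p.1
  | none => PySem.Int.toStr mem ++ "GB"

def DEVICE_CATEGORY : PySem.Dict String String :=
  PySem.Dict.ofList ((PySem.Dict.items DEVICE_MEMORY_MAPPINGS).map
    (fun p => (p.1, resolveCategory p.2)))

def get_memory_category_alt (device_name : String) : String :=
  PySem.Dict.getD DEVICE_CATEGORY device_name "Unknown"

-- ===== PRECONDITION & SPEC =====
def Spec_get_memory_category (device_name : String) (out : String) : Prop := out = get_memory_category_alt device_name
instance (device_name : String) (out : String) : Decidable (Spec_get_memory_category device_name out) := by unfold Spec_get_memory_category; infer_instance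

-- ===== CLAIM (what is proved, stated in full; the proofs are below) =====
def Claim_equal_get_memory_category : Prop := ∀ (device_name : String), Dom_get_memory_category device_name → Spec_get_memory_category device_name (get_memory_category device_name)

-- ===== LEMMAS AND PROOFS =====
theorem memMapMk : DEVICE_MEMORY_MAPPINGS = PySem.Dict.mk [
    ("NVIDIA A100-SXM4-40GB", 40),
    ("NVIDIA A100-SXM4-80GB", 80),
    ("NVIDIA A30", 24),
    ("NVIDIA A40", 48),
    ("NVIDIA GeForce GTX 1080 Ti", 11),
    ("NVIDIA GeForce RTX 2080 Ti", 11),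
    ("NVIDIA H100 80GB HBM3", 80),
    ("NVIDIA H200", 141),
    ("NVIDIA L40", 48),
    ("NVIDIA L40S", 48),
    ("Quadro RTX 6000", 24),
    ("Tesla P100-PCIE-16GB", 16)] := by decide

theorem devCatMk : DEVICE_CATEGORY = PySem.Dict.mk [
    ("NVIDIA A100-SXM4-40GB", "40GB"),
    ("NVIDIA A100-SXM4-80GB", "80GB"),
    ("NVIDIA A30", "24GB"),
    ("NVIDIA A40", "48GB"),
    ("NVIDIA GeForce GTX 1080 Ti", "10-12GB"),
    ("NVIDIA GeForce RTX 2080 Ti", "10-12GB"),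
    ("NVIDIA H100 80GB HBM3", "80GB"),
    ("NVIDIA H200", "140GB+"),
    ("NVIDIA L40", "48GB"),
    ("NVIDIA L40S", "48GB"),
    ("Quadro RTX 6000", "24GB"),
    ("Tesla P100-PCIE-16GB", "16GB")] := by decide

-- ===== VERDICT (by name: the statement is the Claim_ definition above) =====
theorem get_memory_category_spec : Claim_equal_get_memory_category := by
  intro s _
  unfold Spec_get_memory_category get_memory_category get_memory_category_alt get_device_memory_gb
  rw [memMapMk, devCatMk]
  by_cases h1 : "NVIDIA A100-SXM4-40GB" = s
  · subst h1; decide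
  by_cases h2 : "NVIDIA A100-SXM4-80GB" = s
  · subst h2; decide
  by_cases h3 : "NVIDIA A30" = s
  · subst h3; decide
  by_cases h4 : "NVIDIA A40" = s
  · subst h4; decide
  by_cases h5 : "NVIDIA GeForce GTX 1080 Ti" = s
  · subst h5; decide
  by_cases h6 : "NVIDIA GeForce RTX 2080 Ti" = s
  · subst h6; decide
  by_cases h7 : "NVIDIA H100 80GB HBM3" = s
  · subst h7; decide
  by_cases h8 : "NVIDIA H200" = s
  · subst h8; decide
  by_cases h9 : "NVIDIA L40" = s
  · subst h9; decide
  by_cases h10 : "NVIDIA L40S" = s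
  · subst h10; decide
  by_cases h11 : "Quadro RTX 6000" = s
  · subst h11; decide
  by_cases h12 : "Tesla P100-PCIE-16GB" = s
  · subst h12; decide
  simp [PySem.Dict.getD, PySem.Dict.get?,
    h1, h2, h3, h4, h5, h6, h7, h8, h9, h10, h11, h12]
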